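-- pv_equiv track=rewrite | github.com/bakunobu/exercise | 1400_basic_tasks/chap_5/5_46.py | save_series
-- ===== SOURCE A (Python) =====
-- def save_series(n:int) -> list:
--     num_1 = 1
--     num_2 = 2
--     den_1 = 1
--     den_2 = 1
--     list_of_partial = []
--     list_of_partial.append(f'{num_1}/{den_1}')
--     list_of_partial.append(f'{num_2}/{den_2}')
--     for x in range(n-2):
--         num_1, num_2 = num_2, num_1 + num_2
--         den_1, den_2 = den_2, den_1 + den_2
--         list_of_partial.append(f'{num_2}/{den_2}')
--     return(list_of_partial)
-- ===== SOURCE B (Python) =====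
-- def save_series(n: int) -> list:
--     count = max(n, 2)
--     F = [1, 1]
--     for _ in range(count - 1):
--         F.append(F[-1] + F[-2])
--     return [f'{F[i + 1]}/{F[i]}' for i in range(count)]
-- ===== Notes on version B (the rewrite author's own statement) =====
-- stated objective: alternative
-- what changed: Replaces A's single pass that threads four rolling numerator/denominator variables and appends as it goes with two separate passes: first build one Fibonacci table F (F[i+1]+F[i] appended), then format the result as consecutive-pair strings F[i+1]/F[i] in a comprehension.
import Mathlib
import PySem

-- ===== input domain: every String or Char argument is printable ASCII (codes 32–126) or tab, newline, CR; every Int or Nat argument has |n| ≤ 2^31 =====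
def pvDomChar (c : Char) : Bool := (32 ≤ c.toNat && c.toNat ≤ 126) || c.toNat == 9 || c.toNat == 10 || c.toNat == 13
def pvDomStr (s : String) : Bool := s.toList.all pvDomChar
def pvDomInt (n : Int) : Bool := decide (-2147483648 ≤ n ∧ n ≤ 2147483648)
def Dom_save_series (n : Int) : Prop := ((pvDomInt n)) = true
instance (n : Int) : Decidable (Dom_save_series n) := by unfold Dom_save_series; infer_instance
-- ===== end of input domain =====

-- B is an alternative two-pass decomposition (Fibonacci table, then consecutive-pair formatting); same return value as A on every int.

-- ===== PORT A =====
-- the loop body of A's for-loop: (num_1, num_2, den_1, den_2, list_of_partial)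
def stepA (st : Int × Int × Int × Int × List String) (_x : Int) :
    Int × Int × Int × Int × List String :=
  (st.2.1, st.1 + st.2.1, st.2.2.2.1, st.2.2.1 + st.2.2.2.1,
    st.2.2.2.2 ++ [PySem.Int.toStr (st.1 + st.2.1) ++ "/" ++ PySem.Int.toStr (st.2.2.1 + st.2.2.2.1)])

def save_series (n : Int) : List String :=
  let num_1 : Int := 1
  let num_2 : Int := 2
  let den_1 : Int := 1
  let den_2 : Int := 1
  let list_of_partial : List String := []
  let list_of_partial := list_of_partial ++ [PySem.Int.toStr num_1 ++ "/" ++ PySem.Int.toStr den_1]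
  let list_of_partial := list_of_partial ++ [PySem.Int.toStr num_2 ++ "/" ++ PySem.Int.toStr den_2]
  ((PySem.List.pyRange 0 (n - 2) 1).foldl stepA
    (num_1, num_2, den_1, den_2, list_of_partial)).2.2.2.2

-- ===== PORT B =====
-- the table-building loop of Source B; F[-1], F[-2] always exist (F starts with two elements),
-- so pyGetD with default 0 is exact here
def buildFib : Nat → List Int → List Int
  | 0, F => F
  | m + 1, F => buildFib m (F ++ [PySem.List.pyGetD F (-1) 0 + PySem.List.pyGetD F (-2) 0])

def save_series_alt (n : Int) : List String :=
  let count : Int := max n 2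
  let F := buildFib (count - 1).toNat [1, 1]
  -- indices i and i+1 are always in range of F (|F| = count+1), so pyGetD with default 0 is exact
  (PySem.List.pyRange 0 count 1).map (fun i =>
    PySem.Int.toStr (PySem.List.pyGetD F (i + 1) 0) ++ "/" ++ PySem.Int.toStr (PySem.List.pyGetD F i 0))

-- ===== PRECONDITION & SPEC =====
def Spec_save_series (n : Int) (out : List String) : Prop := out = save_series_alt n
instance (n : Int) (out : List String) : Decidable (Spec_save_series n out) := by unfold Spec_save_series; infer_instance

-- ===== CLAIM (what is proved, stated in full; the proofs are below) =====
def Claim_equal_save_series : Prop := ∀ (n : Int), Dom_save_series n → Spec_save_series n (save_series n)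

-- ===== LEMMAS AND PROOFS =====

def fib : Nat → Int
  | 0 => 1
  | 1 => 1
  | k + 2 => fib k + fib (k + 1)

def fibL (L : Nat) : List Int := (List.range L).map (fun i => fib i)

lemma fibL_succ (L : Nat) : fibL (L + 1) = fibL L ++ [fib L] := by
  simp [fibL, List.range_succ]

lemma fibL_length (L : Nat) : (fibL L).length = L := by simp [fibL]

lemma pyGetD_neg {α : Type} (xs : List α) (d : α) (k : Nat) (h1 : 0 < k) (h2 : k ≤ xs.length) :
    PySem.List.pyGetD xs (-(k : Int)) d = xs.getD (xs.length - k) d := by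
  have hne : ¬ (0 : Int) ≤ -(k : Int) := by omega
  have hge : -((xs.length : Nat) : Int) ≤ -(k : Int) := by omega
  have hk0 : ¬ k = 0 := by omega
  simp [PySem.List.pyGetD, PySem.List.pyGet?, PySem.List.pyIdx?, hge, hk0, List.getD]

lemma fibL_getD (L i : Nat) (h : i < L) : (fibL L).getD i 0 = fib i :=
  PySem.List.getD_map_range _ _ _ _ h

lemma buildFib_fibL : ∀ (m j : Nat), 2 ≤ j → buildFib m (fibL j) = fibL (j + m) := by
  intro m
  induction m with
  | zero => intro j _; simp [buildFib]
  | succ m ih =>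
    intro j hj
    have h1 : PySem.List.pyGetD (fibL j) (-1) 0 = fib (j - 1) := by
      have h := pyGetD_neg (fibL j) 0 1 (by omega) (by rw [fibL_length]; omega)
      rw [fibL_length] at h
      rw [show (-1 : Int) = -((1 : Nat) : Int) from by norm_num, h,
        fibL_getD j (j - 1) (by omega)]
    have h2 : PySem.List.pyGetD (fibL j) (-2) 0 = fib (j - 2) := by
      have h := pyGetD_neg (fibL j) 0 2 (by omega) (by rw [fibL_length]; omega)
      rw [fibL_length] at h
      rw [show (-2 : Int) = -((2 : Nat) : Int) from by norm_num, h,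
        fibL_getD j (j - 2) (by omega)]
    have hfib : fib (j - 1) + fib (j - 2) = fib j := by
      have e1 : j - 1 = (j - 2) + 1 := by omega
      have e2 : j = (j - 2) + 2 := by omega
      rw [e1]
      conv_rhs => rw [e2]
      rw [show fib (j - 2 + 2) = fib (j - 2) + fib (j - 2 + 1) from rfl]
      ring
    rw [show buildFib (m + 1) (fibL j) = buildFib m (fibL j ++
        [PySem.List.pyGetD (fibL j) (-1) 0 + PySem.List.pyGetD (fibL j) (-2) 0]) from rfl]
    rw [h1, h2, hfib, ← fibL_succ, ih (j + 1) (by omega),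
      show j + 1 + m = j + (m + 1) from by omega]

lemma loopA : ∀ (l : List Int) (k : Nat) (acc : List String),
    (l.foldl stepA (fib (k + 1), fib (k + 2), fib k, fib (k + 1), acc)).2.2.2.2 =
      acc ++ (List.range l.length).map
        (fun j => PySem.Int.toStr (fib (k + j + 3)) ++ "/" ++ PySem.Int.toStr (fib (k + j + 2))) := by
  intro l
  induction l with
  | nil => intro k acc; simp
  | cons x l ih =>
    intro k acc
    have hstep : stepA (fib (k + 1), fib (k + 2), fib k, fib (k + 1), acc) x =
        (fib (k + 2), fib (k + 3), fib (k + 1), fib (k + 2),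
          acc ++ [PySem.Int.toStr (fib (k + 3)) ++ "/" ++ PySem.Int.toStr (fib (k + 2))]) := rfl
    have harg : (fun j => PySem.Int.toStr (fib (k + 1 + j + 3)) ++ "/" ++ PySem.Int.toStr (fib (k + 1 + j + 2)))
        = (fun j => PySem.Int.toStr (fib (k + (j + 1) + 3)) ++ "/" ++ PySem.Int.toStr (fib (k + (j + 1) + 2))) := by
      funext j
      rw [show k + 1 + j + 3 = k + (j + 1) + 3 from by omega,
        show k + 1 + j + 2 = k + (j + 1) + 2 from by omega]
    rw [List.foldl_cons, hstep, ih (k + 1), harg]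
    rw [List.length_cons, List.range_succ_eq_map, List.map_cons, List.map_map]
    rw [List.append_assoc, List.singleton_append]
    rw [show k + 0 + 3 = k + 3 from by omega, show k + 0 + 2 = k + 2 from by omega]
    have hcomp : ((fun j => PySem.Int.toStr (fib (k + j + 3)) ++ "/" ++ PySem.Int.toStr (fib (k + j + 2))) ∘ Nat.succ)
        = (fun j => PySem.Int.toStr (fib (k + (j + 1) + 3)) ++ "/" ++ PySem.Int.toStr (fib (k + (j + 1) + 2))) := by
      funext j; simp [Function.comp, Nat.succ_eq_add_one]
    rw [hcomp]

lemma save_series_eq (n : Int) :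
    save_series n = (List.range ((n - 2).toNat + 2)).map
      (fun k => PySem.Int.toStr (fib (k + 1)) ++ "/" ++ PySem.Int.toStr (fib k)) := by
  have hinit : ((1 : Int), (2 : Int), (1 : Int), (1 : Int),
      ([] : List String) ++ [PySem.Int.toStr 1 ++ "/" ++ PySem.Int.toStr 1]
        ++ [PySem.Int.toStr 2 ++ "/" ++ PySem.Int.toStr 1]) =
      ((fib (0 + 1) : Int), (fib (0 + 2) : Int), (fib 0 : Int), (fib (0 + 1) : Int),
        [PySem.Int.toStr 1 ++ "/" ++ PySem.Int.toStr 1,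
         PySem.Int.toStr 2 ++ "/" ++ PySem.Int.toStr 1]) := rfl
  simp only [save_series]
  rw [hinit, loopA (PySem.List.pyRange 0 (n - 2) 1) 0
    [PySem.Int.toStr 1 ++ "/" ++ PySem.Int.toStr 1,
     PySem.Int.toStr 2 ++ "/" ++ PySem.Int.toStr 1]]
  have hlen : (PySem.List.pyRange 0 (n - 2) 1).length = (n - 2).toNat := by
    rw [PySem.List.length_pyRange_one]; congr 1; omega
  rw [hlen, show (n - 2).toNat + 2 = 2 + (n - 2).toNat from by omega, List.range_add]
  rw [List.map_append, List.map_map]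
  have hacc : (List.range 2).map
      (fun k => PySem.Int.toStr (fib (k + 1)) ++ "/" ++ PySem.Int.toStr (fib k)) =
      [PySem.Int.toStr 1 ++ "/" ++ PySem.Int.toStr 1,
       PySem.Int.toStr 2 ++ "/" ++ PySem.Int.toStr 1] := by decide
  rw [hacc, List.append_right_inj]
  apply List.map_congr_left
  intro a _
  simp only [Function.comp]
  rw [show 0 + a + 3 = 2 + a + 1 from by omega, show 0 + a + 2 = 2 + a + 0 from by omega,
    show 2 + a + 0 = 2 + a from by omega]

lemma save_series_alt_eq (n : Int) :
    save_series_alt n = (List.range ((n - 2).toNat + 2)).map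
      (fun k => PySem.Int.toStr (fib (k + 1)) ++ "/" ++ PySem.Int.toStr (fib k)) := by
  have hmax : max n 2 = n ∨ max n 2 = 2 := by
    rcases le_total n 2 with h | h
    · right; exact max_eq_right h
    · left; exact max_eq_left h
  have hc1 : (max n 2).toNat = (n - 2).toNat + 2 := by rcases hmax with h | h <;> rw [h] <;> omega
  have hc2 : (max n 2 - 1).toNat = (n - 2).toNat + 1 := by rcases hmax with h | h <;> rw [h] <;> omega
  have h2 : (0 : Int) ≤ max n 2 := by rcases hmax with h | h <;> omega
  set m := (n - 2).toNat with hm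
  have hF : buildFib (max n 2 - 1).toNat [1, 1] = fibL (m + 3) := by
    have h11 : ([1, 1] : List Int) = fibL 2 := by decide
    rw [hc2, h11, buildFib_fibL (m + 1) 2 (by omega)]
    congr 1; omega
  show (PySem.List.pyRange 0 (max n 2) 1).map _ = _
  rw [hF, PySem.List.pyRange_one]
  rw [show (max n 2 - 0).toNat = m + 2 from by omega, List.map_map]
  apply List.map_congr_left
  intro a ha
  have halt : a < m + 2 := List.mem_range.mp ha
  have e1 : (0 : Int) + (a : Nat) + 1 = ((a + 1 : Nat) : Int) := by push_cast; ring
  have e2 : (0 : Int) + (a : Nat) = ((a : Nat) : Int) := by ring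
  simp only [Function.comp]
  rw [e1, e2, PySem.List.pyGetD_natCast, PySem.List.pyGetD_natCast,
    fibL_getD (m + 3) (a + 1) (by omega), fibL_getD (m + 3) a (by omega)]

-- ===== VERDICT (by name: the statement is the Claim_ definition above) =====
theorem save_series_spec : Claim_equal_save_series := by
  intro n _
  show save_series n = save_series_alt n
  rw [save_series_eq, save_series_alt_eq]
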